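-- pv_equiv track=rewrite | github.com/trung-hn/leetcode-solutions | src/1395.count-number-of-teams.py | numTeams
-- ===== SOURCE A (Python) =====
-- from typing import List
--
-- def numTeams(rating: List[int]) -> int:
--     res = 0
--     for i, num in enumerate(rating):
--         lt_left = lt_right = gt_left = gt_right = 0
--         for j, num2 in enumerate(rating):
--             if num < num2 and i < j:
--                 lt_left += 1
--             if num > num2 and i < j:
--                 gt_left += 1
--             if num < num2 and i > j:
--                 lt_right += 1
--             if num > num2 and i > j:
--                 gt_right += 1
--         res += lt_left * gt_right + gt_left * lt_right
--     return res
-- ===== SOURCE B (Python) =====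
-- def numTeams(rating):
--     # Dynamic programming on monotone chains: for each element x, dp stores
--     # (value, #increasing pairs ending at it, #decreasing pairs ending at it);
--     # extending those length-2 chains by x counts the triples topped by x.
--     res = 0
--     dp = []  # (value v, up = count of smaller elements before v, down = count of greater)
--     for x in rating:
--         up = down = add = 0
--         for v, u, d in dp:
--             if v < x:
--                 up += 1
--                 add += u
--             elif v > x:
--                 down += 1
--                 add += d
--         res += add
--         dp.append((x, up, down))
--     return res
-- ===== Notes on version B (the rewrite author's own statement) =====
-- stated objective: alternative
-- what changed: A counts, for each middle element, smaller/greater elements on both sides and multiplies the counts; B is a dynamic program over monotone chains: it stores for each element the number of increasing/decreasing pairs ending at it and, when a new element extends such a pair, adds those stored pair counts to the result, never computing any right-side count.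
import Mathlib
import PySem

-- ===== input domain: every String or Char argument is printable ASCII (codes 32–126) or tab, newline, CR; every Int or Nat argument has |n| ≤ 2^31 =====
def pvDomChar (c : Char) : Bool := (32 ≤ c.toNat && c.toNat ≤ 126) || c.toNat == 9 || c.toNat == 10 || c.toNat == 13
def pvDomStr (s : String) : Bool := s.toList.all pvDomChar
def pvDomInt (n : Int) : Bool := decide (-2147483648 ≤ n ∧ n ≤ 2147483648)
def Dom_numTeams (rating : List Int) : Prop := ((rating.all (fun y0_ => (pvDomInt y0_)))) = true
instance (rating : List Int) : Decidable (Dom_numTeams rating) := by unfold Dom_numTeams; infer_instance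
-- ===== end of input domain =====

-- B replaces A's per-middle product of left/right smaller/greater counts by a dynamic
-- program over monotone chains: each element stores its number of increasing/decreasing
-- pairs ending there, and a new element extending such a pair adds the stored count
-- (objective: alternative algorithm, same return value).

-- ===== PORT A =====
def numTeams (rating : List Int) : Int :=
  (PySem.List.enumerate rating).foldl (fun res iv =>
    let i := iv.1
    let num := iv.2
    let c := (PySem.List.enumerate rating).foldl
      (fun (s : Int × Int × Int × Int) jv =>
        let j := jv.1
        let num2 := jv.2
        (if num < num2 ∧ i < j then s.1 + 1 else s.1,
         if num > num2 ∧ i < j then s.2.1 + 1 else s.2.1,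
         if num < num2 ∧ i > j then s.2.2.1 + 1 else s.2.2.1,
         if num > num2 ∧ i > j then s.2.2.2 + 1 else s.2.2.2))
      (0, 0, 0, 0)
    res + c.1 * c.2.2.2 + c.2.1 * c.2.2.1) 0

-- ===== PORT B =====
-- state: (res, dp) where dp holds (value, up, down) for each processed element
def numTeams_alt (rating : List Int) : Int :=
  (rating.foldl (fun (s : Int × List (Int × Int × Int)) x =>
      let t := s.2.foldl (fun (t : Int × Int × Int) e =>
          if e.1 < x then (t.1 + 1, t.2.1, t.2.2 + e.2.1)
          else if e.1 > x then (t.1, t.2.1 + 1, t.2.2 + e.2.2)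
          else t) (0, 0, 0)
      (s.1 + t.2.2, s.2 ++ [(x, t.1, t.2.1)]))
    (0, [])).1

-- ===== PRECONDITION & SPEC =====
def Spec_numTeams (rating : List Int) (out : Int) : Prop := out = numTeams_alt rating
instance (rating : List Int) (out : Int) : Decidable (Spec_numTeams rating out) := by unfold Spec_numTeams; infer_instance

-- ===== CLAIM (what is proved, stated in full; the proofs are below) =====
def Claim_equal_numTeams : Prop := ∀ (rating : List Int), Dom_numTeams rating → Spec_numTeams rating (numTeams rating)

-- ===== LEMMAS AND PROOFS =====

-- counting helper: number of elements of l satisfying p, as Int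
def pvCnt (p : Int → Bool) (l : List Int) : Int := (l.countP p : Nat)

-- A-side abstract sum: for each middle x (prefix t, suffix r), left·right count products
def pvTerm (t : List Int) (x : Int) (r : List Int) : Int :=
  pvCnt (fun v => x < v) r * pvCnt (fun v => v < x) t
    + pvCnt (fun v => v < x) r * pvCnt (fun v => x < v) t

def pvS : List Int → List Int → Int
  | _, [] => 0
  | t, x :: r => pvTerm t x r + pvS (t ++ [x]) r

-- B-side abstract recursion: dp = weighted processed elements, p = their values
def pvVals (dp : List (Int × Int × Int)) : List Int := dp.map (fun e => e.1)

def pvG (dp : List (Int × Int × Int)) (x : Int) : Int :=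
  (dp.map (fun e => if e.1 < x then e.2.1 else if x < e.1 then e.2.2 else 0)).sum

def pvB (dp : List (Int × Int × Int)) (p : List Int) : List Int → Int
  | [] => 0
  | x :: r =>
      pvG dp x
        + pvB (dp ++ [(x, pvCnt (fun v => v < x) p, pvCnt (fun v => x < v) p)]) (p ++ [x]) r

-- weighted list of r, each element tagged with its left counts relative to growing prefix
def pvWt : List Int → List Int → List (Int × Int × Int)
  | _, [] => []
  | t, x :: r => (x, pvCnt (fun v => v < x) t, pvCnt (fun v => x < v) t) :: pvWt (t ++ [x]) r

-- A-side sum over a weighted list (left counts stored, right counts from the suffix)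
def pvSA : List (Int × Int × Int) → Int
  | [] => 0
  | e :: r =>
      e.2.1 * pvCnt (fun v => e.1 < v) (pvVals r)
        + e.2.2 * pvCnt (fun v => v < e.1) (pvVals r) + pvSA r

-- hanging contribution of stored dp entries over the remaining list r
def pvW (dp : List (Int × Int × Int)) (r : List Int) : Int :=
  (dp.map (fun e => e.2.1 * pvCnt (fun v => e.1 < v) r + e.2.2 * pvCnt (fun v => v < e.1) r)).sum

theorem pvCnt_nil (p : Int → Bool) : pvCnt p [] = 0 := rfl

theorem pvCnt_cons (p : Int → Bool) (v : Int) (l : List Int) :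
    pvCnt p (v :: l) = (if p v then 1 else 0) + pvCnt p l := by
  unfold pvCnt
  rw [List.countP_cons]
  by_cases h : p v <;> (simp [h]; try omega)

-- ---------- A = pvS ----------

theorem numTeams_inner (x : Int) (m : Nat) :
    ∀ (l : List Int) (k : Nat) (a b c d : Int),
    (PySem.List.enumerate l (k : Int)).foldl
      (fun (s : Int × Int × Int × Int) jv =>
        let j := jv.1
        let num2 := jv.2
        (if x < num2 ∧ (m : Int) < j then s.1 + 1 else s.1,
         if x > num2 ∧ (m : Int) < j then s.2.1 + 1 else s.2.1,
         if x < num2 ∧ (m : Int) > j then s.2.2.1 + 1 else s.2.2.1,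
         if x > num2 ∧ (m : Int) > j then s.2.2.2 + 1 else s.2.2.2))
      (a, b, c, d)
    = (a + pvCnt (fun v => x < v) (l.drop (m + 1 - k)),
       b + pvCnt (fun v => v < x) (l.drop (m + 1 - k)),
       c + pvCnt (fun v => x < v) (l.take (m - k)),
       d + pvCnt (fun v => v < x) (l.take (m - k)))
  | [], k, a, b, c, d => by
      simp [PySem.List.enumerate_nil, pvCnt]
  | v :: l, k, a, b, c, d => by
      rw [PySem.List.enumerate_cons]
      have hk1 : ((k : Int) + 1) = ((k + 1 : Nat) : Int) := by push_cast; ring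
      by_cases hmk : m < k
      · have hlt : (m : Int) < (k : Int) := by exact_mod_cast hmk
        have hgt : ¬ (m : Int) > (k : Int) := by omega
        have h1 : m + 1 - k = 0 := by omega
        have h2 : m - k = 0 := by omega
        have h1' : m + 1 - (k + 1) = 0 := by omega
        have h2' : m - (k + 1) = 0 := by omega
        simp only [List.foldl_cons, hk1]
        rw [numTeams_inner x m l (k + 1)]
        simp only [h1, h2, h1', h2', List.drop_zero, List.take_zero, hlt, hgt]
        simp only [pvCnt_cons, pvCnt_nil, and_true, and_false, if_false, gt_iff_lt]
        by_cases hxv : x < v <;> by_cases hvx : v < x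
        · exact absurd hvx (by omega)
        · simp [hxv, hvx]; try ring
        · simp [hxv, hvx]; try ring
        · simp [hxv, hvx]; try ring
      · have hlt : ¬ (m : Int) < (k : Int) := by
          intro h; exact hmk (by exact_mod_cast h)
        simp only [List.foldl_cons, hk1]
        rw [numTeams_inner x m l (k + 1)]
        by_cases hkm : k < m
        · have hgt : (m : Int) > (k : Int) := by exact_mod_cast hkm
          have h1 : m + 1 - k = (m + 1 - (k + 1)) + 1 := by omega
          have h2 : m - k = (m - (k + 1)) + 1 := by omega
          simp only [hlt, hgt, and_true, and_false, if_false, h1, h2,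
            List.drop_succ_cons, List.take_succ_cons, gt_iff_lt]
          simp only [pvCnt_cons]
          by_cases hxv : x < v <;> by_cases hvx : v < x
          · exact absurd hvx (by omega)
          · simp [hxv, hvx]; try ring
          · simp [hxv, hvx]; try ring
          · simp [hxv, hvx]; try ring
        · have hkm' : k = m := by omega
          have hgt : ¬ (m : Int) > (k : Int) := by
            subst hkm'; omega
          have h1 : m + 1 - k = 1 := by omega
          have h2 : m - k = 0 := by omega
          have h2' : m - (k + 1) = 0 := by omega
          simp [hlt, hgt, h1, h2, h2', List.drop_succ_cons, pvCnt_nil]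

theorem numTeams_outer (full : List Int) :
    ∀ (r t : List Int) (acc : Int), full = t ++ r →
    (PySem.List.enumerate r (t.length : Int)).foldl (fun res iv =>
      let i := iv.1
      let num := iv.2
      let c := (PySem.List.enumerate full).foldl
        (fun (s : Int × Int × Int × Int) jv =>
          let j := jv.1
          let num2 := jv.2
          (if num < num2 ∧ i < j then s.1 + 1 else s.1,
           if num > num2 ∧ i < j then s.2.1 + 1 else s.2.1,
           if num < num2 ∧ i > j then s.2.2.1 + 1 else s.2.2.1,
           if num > num2 ∧ i > j then s.2.2.2 + 1 else s.2.2.2))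
        (0, 0, 0, 0)
      res + c.1 * c.2.2.2 + c.2.1 * c.2.2.1) acc
    = acc + pvS t r
  | [], t, acc, h => by simp [PySem.List.enumerate_nil, pvS]
  | x :: r, t, acc, h => by
      rw [PySem.List.enumerate_cons, List.foldl_cons]
      have hcast : ((t.length : Int) + 1) = (((t ++ [x]).length : Nat) : Int) := by
        simp
      have hinner := numTeams_inner x t.length full 0 0 0 0 0
      have htake : full.take (t.length - 0) = t := by
        simp [h]
      have hdrop : full.drop (t.length + 1 - 0) = r := by
        have : t.length + 1 - 0 = t.length + 1 := by omega
        rw [this, h]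
        rw [show t ++ x :: r = (t ++ [x]) ++ r by simp]
        have : t.length + 1 = (t ++ [x]).length := by simp
        rw [this, List.drop_left]
      rw [htake, hdrop] at hinner
      simp only [Nat.cast_zero] at hinner
      simp only []
      rw [hinner, hcast,
        numTeams_outer full r (t ++ [x]) _ (by simp [h])]
      simp only [pvS, pvTerm]
      ring

theorem numTeams_eq_pvS (rating : List Int) : numTeams rating = pvS [] rating := by
  unfold numTeams
  have := numTeams_outer rating rating [] 0 (by simp)
  simpa using this

-- ---------- B = pvB ----------

theorem pvVals_append (a b : List (Int × Int × Int)) :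
    pvVals (a ++ b) = pvVals a ++ pvVals b := by
  simp [pvVals]

-- the inner fold of the port computes (up, down, pvG dp x)
theorem numTeams_alt_inner (x : Int) :
    ∀ (dp : List (Int × Int × Int)) (a b c : Int),
    dp.foldl (fun (t : Int × Int × Int) e =>
        if e.1 < x then (t.1 + 1, t.2.1, t.2.2 + e.2.1)
        else if e.1 > x then (t.1, t.2.1 + 1, t.2.2 + e.2.2)
        else t) (a, b, c)
    = (a + pvCnt (fun v => v < x) (pvVals dp),
       b + pvCnt (fun v => x < v) (pvVals dp),
       c + pvG dp x)
  | [], a, b, c => by simp [pvVals, pvG, pvCnt]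
  | e :: dp, a, b, c => by
      rw [List.foldl_cons]
      have hv : pvVals (e :: dp) = e.1 :: pvVals dp := rfl
      have hg : pvG (e :: dp) x
          = (if e.1 < x then e.2.1 else if x < e.1 then e.2.2 else 0) + pvG dp x := by
        simp [pvG]
      rw [hv, hg]
      by_cases h1 : e.1 < x
      · have hx : ¬ x < e.1 := by omega
        have c1 : pvCnt (fun v => v < x) (e.1 :: pvVals dp)
            = 1 + pvCnt (fun v => v < x) (pvVals dp) := by
          rw [pvCnt_cons]; simp [h1]
        have c2 : pvCnt (fun v => x < v) (e.1 :: pvVals dp)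
            = pvCnt (fun v => x < v) (pvVals dp) := by
          rw [pvCnt_cons]; simp [hx]
        simp only [h1, if_pos]
        rw [numTeams_alt_inner x dp, c1, c2, Prod.mk.injEq, Prod.mk.injEq]
        refine ⟨by ring, by ring, by ring⟩
      · by_cases h2 : x < e.1
        · have c1 : pvCnt (fun v => v < x) (e.1 :: pvVals dp)
              = pvCnt (fun v => v < x) (pvVals dp) := by
            rw [pvCnt_cons]; simp [h1]
          have c2 : pvCnt (fun v => x < v) (e.1 :: pvVals dp)
              = 1 + pvCnt (fun v => x < v) (pvVals dp) := by
            rw [pvCnt_cons]; simp [h2]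
          simp only [h1, gt_iff_lt, h2, if_pos, if_neg, not_false_iff]
          rw [numTeams_alt_inner x dp, c1, c2, Prod.mk.injEq, Prod.mk.injEq]
          refine ⟨by ring, by ring, by ring⟩
        · have c1 : pvCnt (fun v => v < x) (e.1 :: pvVals dp)
              = pvCnt (fun v => v < x) (pvVals dp) := by
            rw [pvCnt_cons]; simp [h1]
          have c2 : pvCnt (fun v => x < v) (e.1 :: pvVals dp)
              = pvCnt (fun v => x < v) (pvVals dp) := by
            rw [pvCnt_cons]; simp [h2]
          simp only [h1, gt_iff_lt, h2, if_neg, not_false_iff]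
          rw [numTeams_alt_inner x dp, c1, c2, Prod.mk.injEq, Prod.mk.injEq]
          refine ⟨by ring, by ring, by ring⟩

-- the outer fold of the port computes pvB
theorem numTeams_alt_outer :
    ∀ (r : List Int) (dp : List (Int × Int × Int)) (acc : Int),
    (r.foldl (fun (s : Int × List (Int × Int × Int)) x =>
        let t := s.2.foldl (fun (t : Int × Int × Int) e =>
            if e.1 < x then (t.1 + 1, t.2.1, t.2.2 + e.2.1)
            else if e.1 > x then (t.1, t.2.1 + 1, t.2.2 + e.2.2)
            else t) (0, 0, 0)
        (s.1 + t.2.2, s.2 ++ [(x, t.1, t.2.1)])) (acc, dp)).1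
    = acc + pvB dp (pvVals dp) r
  | [], dp, acc => by simp [pvB]
  | x :: r, dp, acc => by
      rw [List.foldl_cons]
      simp only [numTeams_alt_inner x dp 0 0 0, zero_add]
      rw [numTeams_alt_outer r (dp ++ [(x, pvCnt (fun v => v < x) (pvVals dp),
            pvCnt (fun v => x < v) (pvVals dp))]) (acc + pvG dp x)]
      rw [pvVals_append]
      simp only [pvB, pvVals, List.map_cons, List.map_nil]
      ring

theorem numTeams_alt_eq_pvB (rating : List Int) :
    numTeams_alt rating = pvB [] [] rating := by
  unfold numTeams_alt
  rw [numTeams_alt_outer rating [] 0]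
  simp [pvVals]

-- ---------- the exchange: pvB = pvSA ∘ pvWt = pvS ----------

theorem pvW_append (a b : List (Int × Int × Int)) (r : List Int) :
    pvW (a ++ b) r = pvW a r + pvW b r := by
  simp [pvW]

theorem pvW_cons_list (dp : List (Int × Int × Int)) (x : Int) (r : List Int) :
    pvW dp (x :: r) = pvG dp x + pvW dp r := by
  induction dp with
  | nil => simp [pvW, pvG]
  | cons e dp ih =>
      have hW : pvW (e :: dp) (x :: r)
          = e.2.1 * pvCnt (fun v => e.1 < v) (x :: r)
            + e.2.2 * pvCnt (fun v => v < e.1) (x :: r) + pvW dp (x :: r) := by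
        simp [pvW]
        try ring
      have hW' : pvW (e :: dp) r
          = e.2.1 * pvCnt (fun v => e.1 < v) r
            + e.2.2 * pvCnt (fun v => v < e.1) r + pvW dp r := by
        simp [pvW]
        try ring
      have hG : pvG (e :: dp) x
          = (if e.1 < x then e.2.1 else if x < e.1 then e.2.2 else 0) + pvG dp x := by
        simp [pvG]
      rw [hW, hW', hG, ih, pvCnt_cons, pvCnt_cons]
      by_cases h1 : e.1 < x <;> by_cases h2 : x < e.1
      · omega
      · simp [h1, h2]; ring
      · simp [h1, h2]; ring
      · simp [h1, h2]; ring

-- exchange lemma: contributions of stored entries split off as pvW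
theorem pvB_exchange :
    ∀ (r : List Int) (dp : List (Int × Int × Int)) (p : List Int),
    pvB dp p r = pvW dp r + pvB [] p r
  | [], dp, p => by simp [pvB, pvW, pvCnt_nil]
  | x :: r, dp, p => by
      simp only [pvB]
      rw [pvB_exchange r (dp ++ [(x, pvCnt (fun v => v < x) p, pvCnt (fun v => x < v) p)]) (p ++ [x]),
          pvB_exchange r ([] ++ [(x, pvCnt (fun v => v < x) p, pvCnt (fun v => x < v) p)]) (p ++ [x])]
      rw [pvW_append, pvW_cons_list]
      have hG0 : pvG [] x = 0 := rfl
      rw [hG0]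
      simp only [List.nil_append]
      try ring

theorem pvVals_pvWt : ∀ (r t : List Int), pvVals (pvWt t r) = r
  | [], t => rfl
  | x :: r, t => by
      simp only [pvWt, pvVals, List.map_cons]
      have := pvVals_pvWt r (t ++ [x])
      simp [pvVals] at this
      simp [this]

-- B's recursion from an empty store equals the A-side weighted sum
theorem pvB_eq_pvSA : ∀ (r p : List Int), pvB [] p r = pvSA (pvWt p r)
  | [], p => rfl
  | x :: r, p => by
      simp only [pvB, pvWt, pvSA]
      have hG0 : pvG [] x = 0 := rfl
      rw [hG0, List.nil_append,
          pvB_exchange r [(x, pvCnt (fun v => v < x) p, pvCnt (fun v => x < v) p)] (p ++ [x]),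
          pvB_eq_pvSA r (p ++ [x])]
      have hW : pvW [(x, pvCnt (fun v => v < x) p, pvCnt (fun v => x < v) p)] r
          = pvCnt (fun v => v < x) p * pvCnt (fun v => x < v) r
            + pvCnt (fun v => x < v) p * pvCnt (fun v => v < x) r := by
        simp [pvW]
      rw [hW, pvVals_pvWt r (p ++ [x])]
      ring

-- A's abstract sum equals the weighted A-side sum
theorem pvS_eq_pvSA : ∀ (r t : List Int), pvS t r = pvSA (pvWt t r)
  | [], t => rfl
  | x :: r, t => by
      simp only [pvS, pvWt, pvSA, pvTerm]
      rw [pvS_eq_pvSA r (t ++ [x]), pvVals_pvWt r (t ++ [x])]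
      ring

-- ===== VERDICT (by name: the statement is the Claim_ definition above) =====
theorem numTeams_spec : Claim_equal_numTeams := by
  intro rating _
  unfold Spec_numTeams
  rw [numTeams_eq_pvS, numTeams_alt_eq_pvB, pvB_eq_pvSA, pvS_eq_pvSA]
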